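-- pv_equiv track=rewrite | github.com/dagi97/A2SV | 01-Nov-2025/Count ways to group overlapping ranges 406875.py | countWays
-- ===== SOURCE A (Python) =====
-- from typing import List
--
-- def countWays(ranges: List[List[int]]) -> int:
--
--     ranges.sort()
--     c = 0
--     check = -1
--
--
--     for i in range(len(ranges)):
--         s, e = ranges[i]
--         if s > check:
--             c += 1
--             check = e
--         else:
--             check = max(check , e)
--
--
--
--
--
--
--     return  pow(2, c, 10**9 + 7)
-- ===== SOURCE B (Python) =====
-- def countWays(ranges):
--     ranges.sort()
--
--     def solve(lo, hi, bound):
--         # groups opened among ranges[lo:hi], given that all coordinates up to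
--         # `bound` are already covered; also returns the updated covered bound
--         if hi - lo == 1:
--             s, e = ranges[lo]
--             if s > bound:
--                 return 1, e
--             return 0, max(bound, e)
--         mid = (lo + hi) // 2
--         gl, bl = solve(lo, mid, bound)
--         gr, br = solve(mid, hi, bl)
--         return gl + gr, br
--
--     groups = solve(0, len(ranges), -1)[0] if ranges else 0
--     return pow(2, groups, 10 ** 9 + 7)
-- ===== Notes on version B (the rewrite author's own statement) =====
-- stated objective: alternative
-- what changed: Replaces A's left-to-right stateful scan (counter plus running 'check') by a divide-and-conquer over the sorted array: each half recursively yields a (groups, covered-bound) pair, the right half is solved under the left half's bound, and the counts are added.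
import Mathlib
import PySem

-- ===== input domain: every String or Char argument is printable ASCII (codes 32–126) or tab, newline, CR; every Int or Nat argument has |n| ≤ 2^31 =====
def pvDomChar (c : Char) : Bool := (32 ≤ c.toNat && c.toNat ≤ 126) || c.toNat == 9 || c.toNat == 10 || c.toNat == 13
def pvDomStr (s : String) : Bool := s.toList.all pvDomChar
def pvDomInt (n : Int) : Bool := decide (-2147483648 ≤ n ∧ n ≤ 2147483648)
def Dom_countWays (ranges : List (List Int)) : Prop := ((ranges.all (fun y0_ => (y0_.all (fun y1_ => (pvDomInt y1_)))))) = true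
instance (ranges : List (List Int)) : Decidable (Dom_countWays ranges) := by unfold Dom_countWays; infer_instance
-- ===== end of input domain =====

-- B replaces A's left-to-right stateful scan by a divide-and-conquer on the sorted
-- array (each segment returns a (groups, covered-bound) pair; halves are combined).
-- Equivalence is about the return value — both Pythons also sort `ranges` in place
-- identically.

-- ===== PORT A =====
-- the for-loop of A: state (c, check), over i in range(len(sr))
def countWaysLoop (sr : List (List Int)) : Int × Int :=
  (PySem.List.pyRange 0 (sr.length : Int) 1).foldl
    (fun (st : Int × Int) i =>
      match PySem.List.pyGetD sr i [] with
      | [s, e] => if s > st.2 then (st.1 + 1, e) else (st.1, max st.2 e)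
      | _ => st)                                        -- unreachable under Pre_ (s, e = ranges[i] needs length 2)
    (0, -1)

def countWays (ranges : List (List Int)) : Int :=
  PySem.Int.powMod 2 (countWaysLoop (PySem.List.sorted ranges (fun r => r) false)).1.toNat (10 ^ 9 + 7)

-- ===== PORT B =====
-- the inner recursion of B: groups opened among sr[lo:hi] given covered bound, plus the new bound
def solveB (sr : List (List Int)) (lo hi bound : Int) : Int × Int :=
  if hi - lo = 1 then
    match PySem.List.pyGetD sr lo [] with
    | [s, e] => if s > bound then (1, e) else (0, max bound e)
    | _ => (0, bound)                                   -- unreachable under Pre_ (s, e = ranges[lo] needs length 2)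
  else if hi - lo ≤ 1 then (0, bound)                   -- totality guard: Python only calls solve with hi - lo ≥ 1
  else
    let mid := PySem.Int.floordiv (lo + hi) 2
    let l := solveB sr lo mid bound
    let r := solveB sr mid hi l.2
    (l.1 + r.1, r.2)
termination_by (hi - lo).toNat
decreasing_by
  all_goals
    rw [PySem.Int.floordiv_eq_ediv_of_pos (by omega : (0:Int) < 2)]
    omega

-- groups = solve(0, len(ranges), -1)[0] if ranges else 0
def groupsB (sr : List (List Int)) : Int :=
  if sr = [] then 0 else (solveB sr 0 (sr.length : Int) (-1)).1

def countWays_alt (ranges : List (List Int)) : Int :=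
  PySem.Int.powMod 2 (groupsB (PySem.List.sorted ranges (fun r => r) false)).toNat (10 ^ 9 + 7)

-- ===== PRECONDITION & SPEC =====
-- Pre_ excludes exactly the inputs where the Python A raises: 's, e = ranges[i]'
-- raises ValueError unless every inner list has length exactly 2.
def Pre_countWays (ranges : List (List Int)) : Prop := ∀ r ∈ ranges, r.length = 2
instance (ranges : List (List Int)) : Decidable (Pre_countWays ranges) := by unfold Pre_countWays; infer_instance
def pvWitness_countWays : List (List Int) := [[1, 4], [2, 3], [6, 7]]

def Spec_countWays (ranges : List (List Int)) (out : Int) : Prop := out = countWays_alt ranges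
instance (ranges : List (List Int)) (out : Int) : Decidable (Spec_countWays ranges out) := by unfold Spec_countWays; infer_instance

-- ===== CLAIM (what is proved, stated in full; the proofs are below) =====
def Claim_equal_countWays : Prop := ∀ (ranges : List (List Int)), Dom_countWays ranges → Pre_countWays ranges → Spec_countWays ranges (countWays ranges)

-- ===== LEMMAS AND PROOFS =====

-- the step of A's loop, as a function of the current (count, check) state and the row
def stepA (st : Int × Int) (r : List Int) : Int × Int :=
  match r with
  | [s, e] => if s > st.2 then (st.1 + 1, e) else (st.1, max st.2 e)
  | _ => st

lemma stepA_shift (c b : Int) (r : List Int) :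
    stepA (c, b) r = (c + (stepA (0, b) r).1, (stepA (0, b) r).2) := by
  rcases r with _ | ⟨s, _ | ⟨e, _ | t⟩⟩ <;> simp [stepA]
  split <;> simp

-- the count component of the fold is additive in the initial count
lemma foldl_stepA_shift (l : List (List Int)) : ∀ (c b : Int),
    l.foldl stepA (c, b) = (c + (l.foldl stepA (0, b)).1, (l.foldl stepA (0, b)).2) := by
  induction l with
  | nil => intro c b; simp
  | cons r t ih =>
    intro c b
    simp only [List.foldl_cons]
    rw [stepA_shift c b r, ih, ih (stepA (0, b) r).1]
    simp
    omega

-- solveB computes the fold of A's step over the slice sr[lo:hi]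
lemma solveB_eq_foldl (sr : List (List Int)) : ∀ (n : Nat) (lo hi b : Int),
    0 ≤ lo → lo + 1 ≤ hi → hi ≤ (sr.length : Int) → (hi - lo).toNat = n →
    solveB sr lo hi b
      = ((sr.drop lo.toNat).take (hi - lo).toNat).foldl stepA (0, b) := by
  intro n
  induction n using Nat.strong_induction_on with
  | _ n ih =>
    intro lo hi b h0 h1 h2 hn
    rw [solveB]
    by_cases hone : hi - lo = 1
    · have hlt : lo.toNat < sr.length := by omega
      rw [if_pos hone]
      have ht1 : (hi - lo).toNat = 1 := by omega
      rw [ht1, List.drop_eq_getElem_cons hlt, List.take_succ_cons, List.take_zero]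
      simp only [List.foldl_cons, List.foldl_nil]
      rw [PySem.List.pyGetD_eq_getElem (xs := sr) (i := lo) (d := []) h0 (by omega)]
      rcases sr[lo.toNat] with _ | ⟨s, _ | ⟨e, _ | t⟩⟩
      · rfl
      · rfl
      · simp [stepA]
      · rfl
    · have h2lt : 2 ≤ hi - lo := by omega
      rw [if_neg hone, if_neg (by omega)]
      have hmid : PySem.Int.floordiv (lo + hi) 2 = (lo + hi) / 2 :=
        PySem.Int.floordiv_eq_ediv_of_pos (by omega)
      have hb1 : lo + 1 ≤ PySem.Int.floordiv (lo + hi) 2 := by rw [hmid]; omega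
      have hb2 : PySem.Int.floordiv (lo + hi) 2 + 1 ≤ hi := by rw [hmid]; omega
      have e1 := ih (PySem.Int.floordiv (lo + hi) 2 - lo).toNat (by omega) lo
        (PySem.Int.floordiv (lo + hi) 2) b h0 hb1 (by omega) rfl
      have e2 := ih (hi - PySem.Int.floordiv (lo + hi) 2).toNat (by omega)
        (PySem.Int.floordiv (lo + hi) 2) hi
        (((sr.drop lo.toNat).take (PySem.Int.floordiv (lo + hi) 2 - lo).toNat).foldl stepA (0, b)).2
        (by omega) hb2 h2 rfl
      simp only [e1, e2]
      have hsplit : ((sr.drop lo.toNat).take (hi - lo).toNat)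
          = ((sr.drop lo.toNat).take (PySem.Int.floordiv (lo + hi) 2 - lo).toNat)
            ++ ((sr.drop (PySem.Int.floordiv (lo + hi) 2).toNat).take
                (hi - PySem.Int.floordiv (lo + hi) 2).toNat) := by
        have hadd : (hi - lo).toNat
            = (PySem.Int.floordiv (lo + hi) 2 - lo).toNat
              + (hi - PySem.Int.floordiv (lo + hi) 2).toNat := by rw [hmid]; omega
        have hdd : lo.toNat + (PySem.Int.floordiv (lo + hi) 2 - lo).toNat
            = (PySem.Int.floordiv (lo + hi) 2).toNat := by rw [hmid]; omega
        rw [hadd, List.take_add, List.drop_drop, hdd]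
      rw [hsplit, List.foldl_append]
      conv_rhs =>
        rw [← Prod.mk.eta (p := ((sr.drop lo.toNat).take
              (PySem.Int.floordiv (lo + hi) 2 - lo).toNat).foldl stepA (0, b)),
          foldl_stepA_shift]

-- A's loop is the same fold over the whole sorted list
lemma countWaysLoop_eq (sr : List (List Int)) :
    countWaysLoop sr = sr.foldl stepA (0, -1) := by
  unfold countWaysLoop
  rw [PySem.List.foldl_pyRange_zero_pyGetD' sr ([] : List Int)
    (fun (st : Int × Int) r =>
      match r with
      | [s, e] => if s > st.2 then (st.1 + 1, e) else (st.1, max st.2 e)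
      | _ => st) ((0 : Int), (-1 : Int))]
  rfl

-- ===== VERDICT (by name: the statement is the Claim_ definition above) =====
theorem countWays_spec : Claim_equal_countWays := by
  intro ranges _ _
  unfold Spec_countWays countWays countWays_alt groupsB
  rw [countWaysLoop_eq]
  by_cases h : PySem.List.sorted ranges (fun r => r) false = []
  · rw [h]
    simp
  · rw [if_neg h]
    have hpos : 0 < (PySem.List.sorted ranges (fun r => r) false).length :=
      List.length_pos_iff.mpr h
    rw [solveB_eq_foldl (PySem.List.sorted ranges (fun r => r) false)
      (((PySem.List.sorted ranges (fun r => r) false).length : Int) - 0).toNat 0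
      ((PySem.List.sorted ranges (fun r => r) false).length : Int) (-1)
      le_rfl (by omega) le_rfl rfl]
    simp only [Int.sub_zero, Int.toNat_natCast, Int.toNat_zero, List.drop_zero,
      List.take_length]
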